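-- pv_equiv track=rewrite | github.com/stokuj/Exercises | Data Structures and Algorithms, spring 2026/4 Hashing/E2 Mode.py | find_mode2
-- ===== SOURCE A (Python) =====
-- def find_mode2(numbers):
--     count = {}
--     mode = (0, 0)
--
--     for x in numbers:
--         if x not in count:
--             count[x] = 0
--         count[x] += 1
--
--         mode = max(mode, (count[x], x))
--
--     return mode[1]
-- ===== SOURCE B (Python) =====
-- def find_mode2(numbers):
--     count = {}
--     for x in numbers:
--         count[x] = count.get(x, 0) + 1
--     return max(count, key=lambda k: (count[k], k))
-- ===== Notes on version B (the rewrite author's own statement) =====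
-- stated objective: simpler
-- what changed: B builds the full frequency table first and then selects the answer in a separate max-with-key scan over the distinct keys, instead of A's fused single pass that maintains a running (count, value) maximum updated at every element.
-- outside the precondition, e.g. on find_mode2([]): A returns 0, B raises ValueError
import Mathlib
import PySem

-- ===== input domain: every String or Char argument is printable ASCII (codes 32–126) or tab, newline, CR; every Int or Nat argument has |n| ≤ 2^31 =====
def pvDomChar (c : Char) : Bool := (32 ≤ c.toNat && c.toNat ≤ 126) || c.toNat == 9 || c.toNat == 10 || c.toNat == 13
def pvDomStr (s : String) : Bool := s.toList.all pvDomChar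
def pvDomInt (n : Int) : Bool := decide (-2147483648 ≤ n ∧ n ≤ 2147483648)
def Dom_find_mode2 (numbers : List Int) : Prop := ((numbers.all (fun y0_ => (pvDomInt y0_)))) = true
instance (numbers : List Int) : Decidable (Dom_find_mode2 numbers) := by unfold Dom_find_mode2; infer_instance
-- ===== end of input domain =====

-- B builds the full frequency table first, then picks the mode in a separate max-with-key scan;
-- Pre_ excludes the empty list, where A returns its accidental sentinel 0 while B raises ValueError.


-- ===== PORT A =====
-- Python's max on int pairs: lexicographic, the FIRST argument on a full tie
def pymaxA (p q : Int × Int) : Int × Int :=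
  if p.1 < q.1 then q else if q.1 < p.1 then p else if p.2 < q.2 then q else p

def find_mode2 (numbers : List Int) : Int :=
  (numbers.foldl
    (fun (st : PySem.Dict Int Int × (Int × Int)) x =>
      -- if x not in count: count[x] = 0
      let count := if st.1.contains x = false then st.1.insert x 0 else st.1
      -- count[x] += 1  (the key is present here, so getD _ 0 is exactly count[x])
      let count := count.insert x (count.getD x 0 + 1)
      -- mode = max(mode, (count[x], x))
      (count, pymaxA st.2 (count.getD x 0, x)))
    ((PySem.Dict.empty : PySem.Dict Int Int), ((0 : Int), (0 : Int)))).2.2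

-- ===== PORT B =====
def find_mode2_alt (numbers : List Int) : Int :=
  let count := numbers.foldl (fun d x => d.insert x (d.getD x 0 + 1))
    (PySem.Dict.empty : PySem.Dict Int Int)
  match PySem.List.max2? count.keys (fun k => count.getD k 0) (fun k => k) with
  | some m => m
  | none => 0  -- max() over the empty dict raises ValueError in Python; unreachable under Pre_

-- ===== PRECONDITION & SPEC =====
-- Pre_ excludes the empty list, on which A's return of 0 is an accidental sentinel (no element of
-- the list) and B's max over an empty mapping raises ValueError.
def Pre_find_mode2 (numbers : List Int) : Prop := numbers ≠ []
instance (numbers : List Int) : Decidable (Pre_find_mode2 numbers) := by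
  unfold Pre_find_mode2; infer_instance
def pvWitness_find_mode2 : List Int := [1, 2, 2]

def Spec_find_mode2 (numbers : List Int) (out : Int) : Prop := out = find_mode2_alt numbers
instance (numbers : List Int) (out : Int) : Decidable (Spec_find_mode2 numbers out) := by
  unfold Spec_find_mode2; infer_instance

-- ===== CLAIM (what is proved, stated in full; the proofs are below) =====
def Claim_equal_find_mode2 : Prop := ∀ (numbers : List Int), Dom_find_mode2 numbers →
  Pre_find_mode2 numbers → Spec_find_mode2 numbers (find_mode2 numbers)

-- ===== LEMMAS AND PROOFS =====

-- lexicographic ≤ on int pairs (Python's tuple order)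
def lexLe (p q : Int × Int) : Prop := p.1 < q.1 ∨ (p.1 = q.1 ∧ p.2 ≤ q.2)

theorem lexLe_refl (p : Int × Int) : lexLe p p := by unfold lexLe; omega

theorem lexLe_trans {p q r : Int × Int} (h1 : lexLe p q) (h2 : lexLe q r) : lexLe p r := by
  unfold lexLe at *; omega

theorem lexLe_antisymm {p q : Int × Int} (h1 : lexLe p q) (h2 : lexLe q p) : p = q := by
  unfold lexLe at *
  obtain ⟨a, b⟩ := p; obtain ⟨c, d⟩ := q
  simp at *; omega

theorem lexLe_left (p q : Int × Int) : lexLe p (pymaxA p q) := by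
  unfold pymaxA lexLe; split_ifs <;> omega

theorem lexLe_right (p q : Int × Int) : lexLe q (pymaxA p q) := by
  unfold pymaxA lexLe; split_ifs <;> omega

theorem pymaxA_cases (p q : Int × Int) : pymaxA p q = p ∨ pymaxA p q = q := by
  unfold pymaxA; split_ifs <;> simp

theorem pymaxA_eq_left {p q : Int × Int} (h : pymaxA p q = p) : lexLe q p := by
  rw [← h]; exact lexLe_right p q

-- A's dict update (setdefault-style insert 0 then overwrite) is the plain counting insert
theorem A_dict_step (d : PySem.Dict Int Int) (x : Int) :
    (let c := if d.contains x = false then d.insert x 0 else d;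
     c.insert x (c.getD x 0 + 1)) = d.insert x (d.getD x 0 + 1) := by
  by_cases h : d.contains x = true
  · simp [h]
  · simp only [Bool.not_eq_true] at h
    simp [h, PySem.Dict.insert_insert_self, PySem.Dict.getD_insert_self,
      PySem.Dict.getD_of_not_contains _ _ h]

-- the simplified A-step
def stepA (st : PySem.Dict Int Int × (Int × Int)) (x : Int) :
    PySem.Dict Int Int × (Int × Int) :=
  (st.1.insert x (st.1.getD x 0 + 1), pymaxA st.2 (st.1.getD x 0 + 1, x))

theorem find_mode2_eq_simple (numbers : List Int) :
    find_mode2 numbers =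
      (numbers.foldl stepA
        ((PySem.Dict.empty : PySem.Dict Int Int), ((0 : Int), (0 : Int)))).2.2 := by
  unfold find_mode2
  have hf : (fun (st : PySem.Dict Int Int × (Int × Int)) (x : Int) =>
      let count := if st.1.contains x = false then st.1.insert x 0 else st.1
      let count := count.insert x (count.getD x 0 + 1)
      (count, pymaxA st.2 (count.getD x 0, x))) = stepA := by
    funext st x
    have h := A_dict_step st.1 x
    simp only at h
    simp only [stepA, h, PySem.Dict.getD_insert_self]
  rw [hf]

-- the dict component of the fold is independent of the mode component
theorem foldl_stepA_fst (xs : List Int) (i : PySem.Dict Int Int × (Int × Int)) :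
    (xs.foldl stepA i).1 = xs.foldl (fun d x => d.insert x (d.getD x 0 + 1)) i.1 := by
  induction xs generalizing i with
  | nil => rfl
  | cons y ys ih => simpa [stepA] using ih _

theorem foldl_stepA_dict (xs : List Int) :
    (xs.foldl stepA ((PySem.Dict.empty : PySem.Dict Int Int), ((0 : Int), (0 : Int)))).1 =
      PySem.Dict.counter xs := by
  rw [foldl_stepA_fst]
  exact PySem.Dict.foldl_insert_getD_add_one_eq_counter xs

-- the mode component is a lexicographic upper bound of the final (count, value) pairs,
-- and is (0,0) or one of them
theorem A_fold_spec (xs : List Int) :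
    ((xs.foldl stepA ((PySem.Dict.empty : PySem.Dict Int Int), ((0 : Int), (0 : Int)))).2 = (0, 0) ∨
      ∃ v ∈ xs, (xs.foldl stepA (PySem.Dict.empty, (0, 0))).2 = ((xs.count v : Int), v)) ∧
    ∀ v ∈ xs, lexLe ((xs.count v : Int), v)
      (xs.foldl stepA ((PySem.Dict.empty : PySem.Dict Int Int), ((0 : Int), (0 : Int)))).2 := by
  induction xs using List.reverseRecOn with
  | nil => simp
  | append_singleton ys y ih =>
    obtain ⟨ih1, ih2⟩ := ih
    rw [List.foldl_append, List.foldl_cons, List.foldl_nil]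
    set r := ys.foldl stepA ((PySem.Dict.empty : PySem.Dict Int Int), ((0 : Int), (0 : Int)))
      with hr
    have hdict : r.1 = PySem.Dict.counter ys := foldl_stepA_dict ys
    have hcy : (ys ++ [y]).count y = ys.count y + 1 := by simp
    have hpair : r.1.getD y 0 + 1 = ((ys ++ [y]).count y : Int) := by
      rw [hdict, PySem.Dict.getD_counter, hcy]
      push_cast; ring
    have hcount : ∀ v : Int, v ≠ y → (ys ++ [y]).count v = ys.count v := by
      intro v hv
      simp [List.count_append, Ne.symm hv]
    have hstep : (stepA r y).2 = pymaxA r.2 (r.1.getD y 0 + 1, y) := rfl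
    rw [hstep]
    constructor
    · rcases pymaxA_cases r.2 (r.1.getD y 0 + 1, y) with hm | hm
      · -- the old mode survives
        rcases ih1 with h0 | ⟨v, hv, hveq⟩
        · left; rw [hm, h0]
        · right
          by_cases hvy : v = y
          · exfalso
            have hle := pymaxA_eq_left hm
            rw [hveq, hvy, hdict, PySem.Dict.getD_counter] at hle
            unfold lexLe at hle
            simp at hle
          · exact ⟨v, by simp [hv], by rw [hm, hveq, hcount v hvy]⟩
      · right
        exact ⟨y, by simp, by rw [hm, hpair]⟩
    · intro v hv
      by_cases hvy : v = y
      · subst hvy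
        rw [← hpair]
        exact lexLe_right _ _
      · have hv' : v ∈ ys := by
          rcases List.mem_append.mp hv with h | h
          · exact h
          · simp at h; exact absurd h hvy
        rw [hcount v hvy]
        exact lexLe_trans (ih2 v hv') (lexLe_left _ _)

-- the fold inside max2? (key k ↦ (cnt k, k)) with a some accumulator
theorem max2?_fold_inv (cnt : Int → Int) (l : List Int) :
    ∀ m : Int, ∃ r : Int,
      l.foldl (fun acc x =>
        match acc with
        | none => some x
        | some m =>
          if (decide (cnt m < cnt x) || !decide (cnt x < cnt m) && decide (m < x)) = true
          then some x else some m) (some m) = some r ∧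
      (r = m ∨ r ∈ l) ∧ lexLe (cnt m, m) (cnt r, r) ∧
      ∀ k ∈ l, lexLe (cnt k, k) (cnt r, r) := by
  induction l with
  | nil => intro m; exact ⟨m, rfl, Or.inl rfl, lexLe_refl _, by simp⟩
  | cons x t ih =>
    intro m
    simp only [List.foldl_cons]
    by_cases hc : (decide (cnt m < cnt x) || !decide (cnt x < cnt m) && decide (m < x)) = true
    · rw [if_pos hc]
      have hmx : lexLe (cnt m, m) (cnt x, x) := by
        simp only [Bool.or_eq_true, Bool.and_eq_true, Bool.not_eq_true', decide_eq_true_iff,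
          decide_eq_false_iff_not] at hc
        unfold lexLe; simp; omega
      obtain ⟨r, hfold, hmem, hle, hub⟩ := ih x
      refine ⟨r, hfold, ?_, lexLe_trans hmx hle, ?_⟩
      · right
        rcases hmem with h | h
        · simp [h]
        · simp [h]
      · intro k hk
        rcases List.mem_cons.mp hk with h | h
        · subst h; exact hle
        · exact hub k h
    · rw [if_neg hc]
      have hxm : lexLe (cnt x, x) (cnt m, m) := by
        simp only [Bool.or_eq_true, Bool.and_eq_true, Bool.not_eq_true', decide_eq_true_iff,
          decide_eq_false_iff_not, not_or, not_and, not_lt] at hc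
        unfold lexLe; simp; omega
      obtain ⟨r, hfold, hmem, hle, hub⟩ := ih m
      refine ⟨r, hfold, ?_, hle, ?_⟩
      · rcases hmem with h | h
        · exact Or.inl h
        · right; simp [h]
      · intro k hk
        rcases List.mem_cons.mp hk with h | h
        · subst h; exact lexLe_trans hxm hle
        · exact hub k h

theorem max2?_spec (cnt : Int → Int) (keys : List Int) (h : keys ≠ []) :
    ∃ m : Int, PySem.List.max2? keys cnt (fun k => k) = some m ∧ m ∈ keys ∧
      ∀ k ∈ keys, lexLe (cnt k, k) (cnt m, m) := by
  obtain ⟨k0, rest, rfl⟩ := List.exists_cons_of_ne_nil h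
  obtain ⟨r, hfold, hmem, hle, hub⟩ := max2?_fold_inv cnt rest k0
  refine ⟨r, ?_, ?_, ?_⟩
  · show List.foldl _ none (k0 :: rest) = some r
    rw [List.foldl_cons]
    refine Eq.trans ?_ hfold
    congr 1
    funext acc x
    cases acc <;> rfl
  · rcases hmem with h | h
    · simp [h]
    · simp [h]
  · intro k hk
    rcases List.mem_cons.mp hk with h | h
    · subst h; exact hle
    · exact hub k h

-- ===== VERDICT (by name: the statement is the Claim_ definition above) =====
theorem find_mode2_spec : Claim_equal_find_mode2 := by
  intro numbers _ hpre
  unfold Spec_find_mode2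
  rw [find_mode2_eq_simple]
  -- A's side facts
  obtain ⟨hA1, hA2⟩ := A_fold_spec numbers
  set mo := (numbers.foldl stepA
    ((PySem.Dict.empty : PySem.Dict Int Int), ((0 : Int), (0 : Int)))).2 with hmo
  -- B's side
  unfold find_mode2_alt
  have hcnt : numbers.foldl (fun d x => d.insert x (d.getD x 0 + 1))
      (PySem.Dict.empty : PySem.Dict Int Int) = PySem.Dict.counter numbers :=
    PySem.Dict.foldl_insert_getD_add_one_eq_counter numbers
  simp only [hcnt, PySem.Dict.keys_counter]
  have hkeys_ne : PySem.Set.ofList numbers ≠ [] := by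
    obtain ⟨x0, rest, rfl⟩ := List.exists_cons_of_ne_nil hpre
    intro hcontra
    have : x0 ∈ PySem.Set.ofList (x0 :: rest) := (PySem.Set.mem_ofList _ _).mpr (by simp)
    rw [hcontra] at this; exact absurd this (by simp)
  obtain ⟨b, hb, hbmem, hbub⟩ :=
    max2?_spec (fun k => (PySem.Dict.counter numbers).getD k 0) _ hkeys_ne
  rw [hb]
  -- translate B's facts to counts
  have hbxs : b ∈ numbers := (PySem.Set.mem_ofList _ _).mp hbmem
  have hgetD : ∀ k : Int, (PySem.Dict.counter numbers).getD k 0 = (numbers.count k : Int) :=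
    fun k => PySem.Dict.getD_counter numbers k
  have hbub' : ∀ v ∈ numbers, lexLe ((numbers.count v : Int), v) ((numbers.count b : Int), b) := by
    intro v hv
    have := hbub v ((PySem.Set.mem_ofList _ _).mpr hv)
    simpa [hgetD] using this
  -- A's mode is not (0,0)
  obtain ⟨x0, rest, hxs⟩ := List.exists_cons_of_ne_nil hpre
  have hx0 : x0 ∈ numbers := by rw [hxs]; simp
  have hc0 : 1 ≤ numbers.count x0 := List.one_le_count_iff.mpr hx0
  have hub0 := hA2 x0 hx0
  rcases hA1 with h0 | ⟨v, hv, hveq⟩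
  · exfalso
    rw [h0] at hub0
    unfold lexLe at hub0
    simp at hub0
    omega
  · -- mode = (count b, b)
    have h1 : lexLe mo ((numbers.count b : Int), b) := by
      rw [hveq]; exact hbub' v hv
    have h2 : lexLe ((numbers.count b : Int), b) mo := hA2 b hbxs
    have : mo = ((numbers.count b : Int), b) := lexLe_antisymm h1 h2
    rw [this]
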